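-- pv_equiv track=rewrite | github.com/Pride-Huang/NoName | utils/metrics.py | extract_max_indices
-- ===== SOURCE A (Python) =====
-- def extract_max_indices(entropy_list, sublist_size=50, max_elements=3):
--     indices = []
--
--     for i in range(0, len(entropy_list), sublist_size):
--         sublist = entropy_list[i:i + sublist_size]
--         sorted_indices = sorted(range(len(sublist)), key=lambda k: sublist[k], reverse=True)
--         selected_indices = sorted_indices[:max_elements]
--
--         for idx in selected_indices:
--             indices.append(i + idx)
--
--     return indices
-- ===== SOURCE B (Python) =====
-- def extract_max_indices(entropy_list, sublist_size=50, max_elements=3):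
--     out = []
--     for i in range(0, len(entropy_list), sublist_size):
--         block = entropy_list[i:i + sublist_size]
--         chosen = set()
--         for _ in range(min(max_elements, len(block))):
--             best = -1
--             for j in range(len(block)):
--                 if j not in chosen and (best < 0 or block[j] > block[best]):
--                     best = j
--             chosen.add(best)
--             out.append(i + best)
--     return out
-- ===== Notes on version B (the rewrite author's own statement) =====
-- stated objective: alternative
-- what changed: Replaces the full stable sort of each block's index list with selection-style top-k: a set of already-chosen indices plus repeated forward max-scans with strict '>' so the lowest index wins ties; only the min(max_elements, block_len) needed elements are selected instead of sorting the whole block.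
-- intended difference: For negative max_elements (with a positive sublist_size and a block longer than -max_elements) A's slice sorted_indices[:max_elements] accidentally returns all but the last -max_elements sorted indices of each block, while B selects nothing (an empty list), which is the intended meaning of asking for a non-positive number of top elements. — e.g. on extract_max_indices([5, 1], 2, -1): A returns [0], B returns []
import Mathlib
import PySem

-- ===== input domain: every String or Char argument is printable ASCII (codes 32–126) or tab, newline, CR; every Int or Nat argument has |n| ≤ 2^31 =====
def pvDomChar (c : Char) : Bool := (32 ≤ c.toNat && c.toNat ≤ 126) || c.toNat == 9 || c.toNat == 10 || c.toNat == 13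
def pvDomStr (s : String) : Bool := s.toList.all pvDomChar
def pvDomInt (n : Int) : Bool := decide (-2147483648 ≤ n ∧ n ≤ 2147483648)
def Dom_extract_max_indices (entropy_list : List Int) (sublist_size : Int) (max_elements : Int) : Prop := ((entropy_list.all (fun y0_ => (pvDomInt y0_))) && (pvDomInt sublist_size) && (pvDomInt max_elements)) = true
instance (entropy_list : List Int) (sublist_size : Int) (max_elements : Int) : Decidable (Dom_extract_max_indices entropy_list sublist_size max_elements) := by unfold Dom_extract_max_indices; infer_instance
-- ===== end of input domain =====

-- B replaces A's full stable sort of each block's index list by selection-style top-k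
-- (repeated forward max-scans over a chosen-set); alternative algorithm, same values
-- outside D_ (negative max_elements), where B intentionally selects nothing.


-- ===== PORT A =====
-- literal port: per block, stable reverse sort of the index list by value, then slice [:max_elements].
-- sublist[k] is ported as pyGetD (default 0): every k produced by range(len(sublist)) is a valid index, so it is exact.
def extract_max_indices (entropy_list : List Int) (sublist_size : Int) (max_elements : Int) : List Int :=
  (PySem.List.pyRange 0 (entropy_list.length : Int) sublist_size).foldl
    (fun indices i =>
      let sublist := PySem.List.slice entropy_list (some i) (some (i + sublist_size))
      let sorted_indices := PySem.List.sorted (PySem.List.pyRange 0 (sublist.length : Int) 1)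
        (fun k => PySem.List.pyGetD sublist k 0) true
      let selected_indices := PySem.List.slice sorted_indices none (some max_elements)
      selected_indices.foldl (fun acc idx => acc ++ [i + idx]) indices)
    []

-- ===== PORT B =====
-- one forward scan: first not-yet-chosen index of maximal value (strict '>' keeps the lowest index on ties).
-- block[j] / block[best] are ported as pyGetD (default 0): the 'best < 0 ∨ _' guard mirrors Python's short-circuit
-- and every j / accepted best is a valid index, so it is exact.
def pvScanBest (block : List Int) (chosen : PySem.Set Int) : Int :=
  (PySem.List.pyRange 0 (block.length : Int) 1).foldl
    (fun best j =>
      if PySem.Set.contains chosen j = false ∧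
         (best < 0 ∨ PySem.List.pyGetD block best 0 < PySem.List.pyGetD block j 0)
      then j else best)
    (-1)

-- 'for _ in range(min(max_elements, len(block)))': pick the best remaining index, mark it, append i + best
def pvSelect (block : List Int) (i : Int) : Nat → PySem.Set Int → List Int → List Int
  | 0, _chosen, out => out
  | Nat.succ k, chosen, out =>
      let best := pvScanBest block chosen
      pvSelect block i k (PySem.Set.add chosen best) (out ++ [i + best])

def extract_max_indices_alt (entropy_list : List Int) (sublist_size : Int) (max_elements : Int) : List Int :=
  (PySem.List.pyRange 0 (entropy_list.length : Int) sublist_size).foldl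
    (fun out i =>
      let block := PySem.List.slice entropy_list (some i) (some (i + sublist_size))
      pvSelect block i (min max_elements (block.length : Int)).toNat PySem.Set.empty out)
    []

-- ===== PRECONDITION & SPEC =====
-- Python A raises ValueError (range() with step 0) iff sublist_size == 0; Pre_ excludes exactly that.
def Pre_extract_max_indices (entropy_list : List Int) (sublist_size : Int) (max_elements : Int) : Prop :=
  sublist_size ≠ 0
instance (entropy_list : List Int) (sublist_size : Int) (max_elements : Int) : Decidable (Pre_extract_max_indices entropy_list sublist_size max_elements) := by unfold Pre_extract_max_indices; infer_instance

def pvWitness_extract_max_indices : List Int × Int × Int := ([3, 1, 4, 1, 5], 3, 2)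

-- For negative max_elements (with a positive sublist_size and a block longer than -max_elements)
-- A's slice sorted_indices[:max_elements] accidentally returns all but the last -max_elements sorted
-- indices of each block, while B selects nothing, the intended meaning of a non-positive top-k count.
def D_extract_max_indices (entropy_list : List Int) (sublist_size : Int) (max_elements : Int) : Prop :=
  max_elements < 0 ∧ 0 < sublist_size ∧
    -max_elements < min sublist_size (entropy_list.length : Int)
instance (entropy_list : List Int) (sublist_size : Int) (max_elements : Int) : Decidable (D_extract_max_indices entropy_list sublist_size max_elements) := by unfold D_extract_max_indices; infer_instance

def Spec_extract_max_indices (entropy_list : List Int) (sublist_size : Int) (max_elements : Int) (out : List Int) : Prop := ¬ D_extract_max_indices entropy_list sublist_size max_elements → out = extract_max_indices_alt entropy_list sublist_size max_elements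
instance (entropy_list : List Int) (sublist_size : Int) (max_elements : Int) (out : List Int) : Decidable (Spec_extract_max_indices entropy_list sublist_size max_elements out) := by unfold Spec_extract_max_indices; infer_instance

def pvDiffWitness_extract_max_indices : List Int × Int × Int := ([5, 1], 2, -1)
def pvDiffWitnessOut_extract_max_indices : (List Int) × (List Int) := ([0], [])

-- ===== CLAIM (what is proved, stated in full; the proofs are below) =====
def Claim_unchanged_extract_max_indices : Prop := ∀ (entropy_list : List Int) (sublist_size : Int) (max_elements : Int), Dom_extract_max_indices entropy_list sublist_size max_elements → Pre_extract_max_indices entropy_list sublist_size max_elements → Spec_extract_max_indices entropy_list sublist_size max_elements (extract_max_indices entropy_list sublist_size max_elements)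
def Claim_changed_extract_max_indices : Prop := Dom_extract_max_indices (pvDiffWitness_extract_max_indices.1) (pvDiffWitness_extract_max_indices.2.1) (pvDiffWitness_extract_max_indices.2.2) ∧ Pre_extract_max_indices (pvDiffWitness_extract_max_indices.1) (pvDiffWitness_extract_max_indices.2.1) (pvDiffWitness_extract_max_indices.2.2) ∧ D_extract_max_indices (pvDiffWitness_extract_max_indices.1) (pvDiffWitness_extract_max_indices.2.1) (pvDiffWitness_extract_max_indices.2.2) ∧ extract_max_indices (pvDiffWitness_extract_max_indices.1) (pvDiffWitness_extract_max_indices.2.1) (pvDiffWitness_extract_max_indices.2.2) = pvDiffWitnessOut_extract_max_indices.1 ∧ extract_max_indices_alt (pvDiffWitness_extract_max_indices.1) (pvDiffWitness_extract_max_indices.2.1) (pvDiffWitness_extract_max_indices.2.2) = pvDiffWitnessOut_extract_max_indices.2 ∧ pvDiffWitnessOut_extract_max_indices.1 ≠ pvDiffWitnessOut_extract_max_indices.2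
def Claim_exact_extract_max_indices : Prop := ∀ (entropy_list : List Int) (sublist_size : Int) (max_elements : Int), Dom_extract_max_indices entropy_list sublist_size max_elements → Pre_extract_max_indices entropy_list sublist_size max_elements → D_extract_max_indices entropy_list sublist_size max_elements → extract_max_indices entropy_list sublist_size max_elements ≠ extract_max_indices_alt entropy_list sublist_size max_elements

-- ===== LEMMAS AND PROOFS =====

-- the key A sorts by, and the strict "comes first" order of A's stable reverse sort:
-- larger value first, equal values by lower index
def pvKey (block : List Int) (j : Int) : Int := PySem.List.pyGetD block j 0
def pvR (block : List Int) (a b : Int) : Prop :=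
  pvKey block b < pvKey block a ∨ (pvKey block a = pvKey block b ∧ a < b)
def pvL (block : List Int) : List Int :=
  PySem.List.sorted (PySem.List.pyRange 0 (block.length : Int) 1)
    (fun k => PySem.List.pyGetD block k 0) true
-- the scan loop of pvScanBest, cut off after the first b indices (proof-side view of the fold)
def pvScanFold (block : List Int) (chosen : PySem.Set Int) (b : Int) : Int :=
  (PySem.List.pyRange 0 b 1).foldl
    (fun best j =>
      if PySem.Set.contains chosen j = false ∧
         (best < 0 ∨ PySem.List.pyGetD block best 0 < PySem.List.pyGetD block j 0)
      then j else best)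
    (-1)

lemma pvScanBest_eq_fold (block : List Int) (chosen : PySem.Set Int) :
    pvScanBest block chosen = pvScanFold block chosen (block.length : Int) := rfl

lemma pvR_key_le {block : List Int} {a b : Int} (h : pvR block a b) :
    pvKey block b ≤ pvKey block a := by
  rcases h with h | ⟨h, _⟩ <;> omega

lemma pvR_asymm {block : List Int} {a b : Int} (h1 : pvR block a b) (h2 : pvR block b a) : False := by
  rcases h1 with h1 | ⟨h1, h1'⟩ <;> rcases h2 with h2 | ⟨h2, h2'⟩ <;> omega

-- insertBy of a new maximal index into an R-sorted accumulator keeps it R-sorted (stability of A's sort)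
lemma pvIns (block : List Int) (x : Int) (acc : List Int)
    (h1 : acc.Pairwise (pvR block)) (h2 : ∀ y ∈ acc, y < x) :
    (PySem.List.insertBy (fun a b => decide (pvKey block b < pvKey block a)) x acc).Pairwise (pvR block) := by
  induction acc with
  | nil => simp [PySem.List.insertBy]
  | cons y ys ih =>
      rw [List.pairwise_cons] at h1
      by_cases hxy : pvKey block y < pvKey block x
      · rw [show PySem.List.insertBy (fun a b => decide (pvKey block b < pvKey block a)) x (y :: ys)
              = x :: y :: ys from by simp [PySem.List.insertBy, hxy]]
        refine List.pairwise_cons.2 ⟨?_, List.pairwise_cons.2 ⟨h1.1, h1.2⟩⟩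
        intro z hz
        rcases List.mem_cons.1 hz with rfl | hz
        · exact Or.inl hxy
        · have := pvR_key_le (h1.1 z hz); exact Or.inl (by omega)
      · rw [show PySem.List.insertBy (fun a b => decide (pvKey block b < pvKey block a)) x (y :: ys)
              = y :: PySem.List.insertBy (fun a b => decide (pvKey block b < pvKey block a)) x ys from by
                simp [PySem.List.insertBy, hxy]]
        refine List.pairwise_cons.2 ⟨?_, ih h1.2 (fun z hz => h2 z (List.mem_cons_of_mem _ hz))⟩
        intro z hz
        rcases (PySem.List.mem_insertBy _ _ _ _).1 hz with rfl | hz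
        · rcases lt_or_eq_of_le (not_lt.1 hxy) with h | h
          · exact Or.inl h
          · exact Or.inr ⟨h.symm, h2 y List.mem_cons_self⟩
        · exact h1.1 z hz

lemma pvFoldIns (block : List Int) (xs : List Int) : ∀ (acc : List Int),
    acc.Pairwise (pvR block) → (∀ y ∈ acc, ∀ x ∈ xs, y < x) → xs.Pairwise (· < ·) →
    (xs.foldl (fun acc x =>
      PySem.List.insertBy (fun a b => decide (pvKey block b < pvKey block a)) x acc) acc).Pairwise (pvR block) := by
  induction xs with
  | nil => intro acc h1 _ _; simpa using h1
  | cons x xs ih =>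
      intro acc h1 h2 h3
      rw [List.pairwise_cons] at h3
      simp only [List.foldl_cons]
      refine ih _ (pvIns block x acc h1 (fun y hy => h2 y hy x List.mem_cons_self)) ?_ h3.2
      intro y hy z hz
      rcases (PySem.List.mem_insertBy _ _ _ _).1 hy with rfl | hy
      · exact h3.1 z hz
      · exact h2 y hy z (List.mem_cons_of_mem _ hz)

lemma pvRange_pairwise_lt (n : Nat) : (PySem.List.pyRange 0 (n : Int) 1).Pairwise (· < ·) := by
  rw [PySem.List.pyRange_of_pos 0 (n : Int) (by norm_num)]
  refine List.Pairwise.map _ (fun a b h => ?_) List.pairwise_lt_range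
  have : a < b := h
  omega

lemma pvRange_length (n : Nat) : (PySem.List.pyRange 0 (n : Int) 1).length = n := by
  rw [PySem.List.pyRange_of_pos 0 (n : Int) (by norm_num)]
  simp only [List.length_map, List.length_range]
  split_ifs with h
  · omega
  · omega

lemma pvL_pairwise (block : List Int) : (pvL block).Pairwise (pvR block) := by
  unfold pvL
  rw [PySem.List.sorted_rev_eq_foldl_insertBy]
  exact pvFoldIns block _ [] (by simp) (by simp) (pvRange_pairwise_lt block.length)

lemma pvL_perm (block : List Int) :
    (pvL block).Perm (PySem.List.pyRange 0 (block.length : Int) 1) :=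
  PySem.List.sorted_perm _ _ _

lemma pvL_nodup (block : List Int) : (pvL block).Nodup :=
  ((pvL_perm block).nodup_iff).2 ((pvRange_pairwise_lt block.length).imp (fun h => ne_of_lt h))

lemma pvL_length (block : List Int) : (pvL block).length = block.length := by
  rw [(pvL_perm block).length_eq, pvRange_length]

lemma pvL_mem (block : List Int) (x : Int) :
    x ∈ pvL block ↔ 0 ≤ x ∧ x < (block.length : Int) := by
  rw [(pvL_perm block).mem_iff, PySem.List.mem_pyRange_one]

lemma pvL_not_mem_take (block : List Int) (m : Nat) (hm : m < (pvL block).length) :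
    (pvL block)[m] ∉ (pvL block).take m := by
  intro hmem
  rw [List.mem_take_iff_getElem] at hmem
  obtain ⟨i, hi, hEq⟩ := hmem
  have hq := (List.Nodup.getElem_inj_iff (pvL_nodup block)).1 hEq
  omega

-- the m-th element of L is R-below every later one
lemma pvL_least (block : List Int) (m : Nat) (hm : m < (pvL block).length)
    (j : Int) (hj0 : 0 ≤ j) (hjn : j < (block.length : Int))
    (hjc : j ∉ (pvL block).take m) (hne : j ≠ (pvL block)[m]) :
    pvR block (pvL block)[m] j := by
  have hjL : j ∈ pvL block := (pvL_mem block j).2 ⟨hj0, hjn⟩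
  obtain ⟨idx, hidx, rfl⟩ := List.getElem_of_mem hjL
  have hgt : m < idx := by
    rcases Nat.lt_or_ge m idx with h | h
    · exact h
    · rcases Nat.lt_or_ge idx m with h' | h'
      · exact absurd (List.mem_take_iff_getElem.2 ⟨idx, by omega, rfl⟩) hjc
      · have : idx = m := by omega
        subst this
        exact absurd rfl hne
  exact (List.pairwise_iff_getElem.1 (pvL_pairwise block)) m idx hm hidx hgt

lemma pvScanFold_succ (block : List Int) (chosen : PySem.Set Int) (b : Int) (hb : 0 ≤ b) :
    pvScanFold block chosen (b + 1) =
      (if PySem.Set.contains chosen b = false ∧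
          (pvScanFold block chosen b < 0 ∨
            PySem.List.pyGetD block (pvScanFold block chosen b) 0 < PySem.List.pyGetD block b 0)
       then b else pvScanFold block chosen b) := by
  unfold pvScanFold
  rw [PySem.List.pyRange_one_succ_right hb, List.foldl_append]
  rfl

-- the scan invariant: after scanning 0..b-1, best is -1 (everything so far chosen) or the
-- R-least unchosen index so far
lemma pvScan_inv (block : List Int) (chosen : PySem.Set Int) (b : Nat) :
    (pvScanFold block chosen (b : Int) = -1 ∧ ∀ j : Int, 0 ≤ j → j < (b : Int) → j ∈ chosen) ∨
    (0 ≤ pvScanFold block chosen (b : Int) ∧ pvScanFold block chosen (b : Int) < (b : Int) ∧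
      pvScanFold block chosen (b : Int) ∉ chosen ∧
      ∀ j : Int, 0 ≤ j → j < (b : Int) → j ∉ chosen →
        j = pvScanFold block chosen (b : Int) ∨ pvR block (pvScanFold block chosen (b : Int)) j) := by
  induction b with
  | zero =>
      left
      constructor
      · unfold pvScanFold
        rw [Nat.cast_zero, PySem.List.pyRange_one_eq_nil (le_refl (0 : Int))]
        rfl
      · intro j h1 h2; omega
  | succ b ih =>
      have hcast : ((b + 1 : Nat) : Int) = (b : Int) + 1 := by push_cast; ring
      rw [hcast, pvScanFold_succ block chosen (b : Int) (by omega)]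
      set r := pvScanFold block chosen (b : Int) with hr
      by_cases hb : (b : Int) ∈ chosen
      · have hbc : PySem.Set.contains chosen (b : Int) = true := (PySem.Set.contains_iff _ _).2 hb
        rw [if_neg (by rintro ⟨h, -⟩; rw [hbc] at h; exact Bool.noConfusion h)]
        rcases ih with ⟨h1, h2⟩ | ⟨h1, h2, h3, h4⟩
        · left
          refine ⟨h1, ?_⟩
          intro j hj0 hj1
          rcases lt_or_ge j (b : Int) with h | h
          · exact h2 j hj0 h
          · have : j = (b : Int) := by omega
            subst this; exact hb
        · right
          refine ⟨h1, by omega, h3, ?_⟩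
          intro j hj0 hj1 hjc
          rcases lt_or_ge j (b : Int) with h | h
          · exact h4 j hj0 h hjc
          · exact absurd (by rwa [show j = (b : Int) from by omega]) hjc
      · have hbc : PySem.Set.contains chosen (b : Int) = false := by
          rw [Bool.eq_false_iff]
          intro h
          exact hb ((PySem.Set.contains_iff _ _).1 h)
        rcases ih with ⟨h1, h2⟩ | ⟨h1, h2, h3, h4⟩
        · rw [if_pos ⟨hbc, Or.inl (by omega)⟩]
          right
          refine ⟨by omega, by omega, hb, ?_⟩
          intro j hj0 hj1 hjc
          rcases lt_or_ge j (b : Int) with h | h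
          · exact absurd (h2 j hj0 h) hjc
          · left; omega
        · by_cases hkey : PySem.List.pyGetD block r 0 < PySem.List.pyGetD block (b : Int) 0
          · rw [if_pos ⟨hbc, Or.inr hkey⟩]
            right
            refine ⟨by omega, by omega, hb, ?_⟩
            intro j hj0 hj1 hjc
            rcases lt_or_ge j (b : Int) with h | h
            · rcases h4 j hj0 h hjc with rfl | h5
              · right; exact Or.inl hkey
              · right
                left
                have := pvR_key_le h5
                unfold pvKey at this ⊢
                omega
            · left; omega
          · rw [if_neg (by rintro ⟨-, h | h⟩ <;> omega)]
            right
            refine ⟨h1, by omega, h3, ?_⟩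
            intro j hj0 hj1 hjc
            rcases lt_or_ge j (b : Int) with h | h
            · exact h4 j hj0 h hjc
            · have hjb : j = (b : Int) := by omega
              subst hjb
              right
              rcases lt_or_eq_of_le (not_lt.1 hkey) with h' | h'
              · exact Or.inl h'
              · exact Or.inr ⟨(by unfold pvKey; omega), by omega⟩

-- with the first m elements of L already chosen, the scan returns L[m]
lemma pvScan_eq (block : List Int) (m : Nat) (hm : m < (pvL block).length) :
    pvScanBest block ((pvL block).take m) = (pvL block)[m] := by
  have hmn : m < block.length := by rwa [pvL_length] at hm
  have hLm : (pvL block)[m] ∈ pvL block := List.getElem_mem hm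
  have hLmr := (pvL_mem block _).1 hLm
  have hLmc := pvL_not_mem_take block m hm
  rw [pvScanBest_eq_fold]
  rcases pvScan_inv block ((pvL block).take m) block.length with ⟨h1, h2⟩ | ⟨h1, h2, h3, h4⟩
  · exact absurd (h2 _ hLmr.1 hLmr.2) hLmc
  · set r := pvScanFold block ((pvL block).take m) (block.length : Int) with hr
    rcases h4 _ hLmr.1 hLmr.2 hLmc with h | h
    · exact h.symm
    · by_cases hrl : r = (pvL block)[m]
      · exact hrl
      · exact absurd h (fun h' => pvR_asymm h' (pvL_least block m hm r (by omega) h2 h3 hrl))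

-- adding L[m] to the chosen set extends the chosen prefix by one
lemma pvAdd_take (block : List Int) (m : Nat) (hm : m < (pvL block).length) :
    PySem.Set.add ((pvL block).take m) ((pvL block)[m]) = (pvL block).take (m + 1) := by
  have hnc : PySem.Set.contains ((pvL block).take m) ((pvL block)[m]) = false := by
    rw [Bool.eq_false_iff]
    intro h
    exact pvL_not_mem_take block m hm ((PySem.Set.contains_iff _ _).1 h)
  rw [show PySem.Set.add ((pvL block).take m) ((pvL block)[m]) = (pvL block).take m ++ [(pvL block)[m]]
        from by unfold PySem.Set.add; rw [hnc]; rfl]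
  rw [← List.take_concat_get hm, List.concat_eq_append]

-- the selection loop emits i + the next k entries of A's sorted index list
lemma pvSelect_eq (block : List Int) (i : Int) :
    ∀ (k m : Nat) (out : List Int), m + k ≤ (pvL block).length →
      pvSelect block i k ((pvL block).take m) out
        = out ++ (((pvL block).drop m).take k).map (fun idx => i + idx) := by
  intro k
  induction k with
  | zero => intro m out h; simp [pvSelect]
  | succ k ih =>
      intro m out h
      have hm : m < (pvL block).length := by omega
      show pvSelect block i k
            (PySem.Set.add ((pvL block).take m) (pvScanBest block ((pvL block).take m)))
            (out ++ [i + pvScanBest block ((pvL block).take m)])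
          = _
      rw [pvScan_eq block m hm, pvAdd_take block m hm, ih (m + 1) _ (by omega)]
      rw [List.drop_eq_getElem_cons hm, List.take_succ_cons, List.map_cons]
      simp

-- per block, nonnegative max_elements: A's slice of the sorted index list is the k = min(me, len) prefix
lemma pvSlice_pos (block : List Int) (me : Int) (hme : 0 ≤ me) :
    PySem.List.slice (pvL block) none (some me)
      = (pvL block).take ((min me (block.length : Int)).toNat) := by
  rw [PySem.List.slice_to _ hme]
  by_cases h' : me ≤ (block.length : Int)
  · congr 1; omega
  · rw [List.take_of_length_le (by rw [pvL_length]; omega),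
        List.take_of_length_le (by rw [pvL_length]; omega)]

-- per block, negative max_elements on a short block: A's slice is empty
lemma pvSlice_neg (block : List Int) (me : Int) (hme : me < 0)
    (hlen : (block.length : Int) ≤ -me) :
    PySem.List.slice (pvL block) none (some me) = [] := by
  have hs : PySem.List.slice (pvL block) none (some me)
      = List.take (PySem.List.clampIdx (pvL block).length me) (pvL block) := by
    simp [PySem.List.slice]
  rw [hs, pvL_length]
  rw [show PySem.List.clampIdx block.length me = 0 from by
        simp only [PySem.List.clampIdx, hme, if_true]; split_ifs <;> omega]
  simp

-- per block: A's sorted-slice-append equals B's selection loop, given the block is short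
-- enough whenever max_elements is negative
lemma pvBlock (block : List Int) (i me : Int) (acc : List Int)
    (hneg : me < 0 → (block.length : Int) ≤ -me) :
    (PySem.List.slice (pvL block) none (some me)).foldl (fun a idx => a ++ [i + idx]) acc
      = pvSelect block i ((min me (block.length : Int)).toNat) PySem.Set.empty acc := by
  rcases le_or_gt 0 me with h | h
  · have hk : ((min me (block.length : Int)).toNat) ≤ (pvL block).length := by
      rw [pvL_length]; omega
    rw [PySem.List.foldl_append_singleton_eq_map, pvSlice_pos block me h,
        show (PySem.Set.empty : PySem.Set Int) = (pvL block).take 0 from by simp [PySem.Set.empty],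
        pvSelect_eq block i _ 0 acc (by omega)]
    simp
  · rw [pvSlice_neg block me h (hneg h),
        show (min me (block.length : Int)).toNat = 0 from by omega]
    rfl

-- length of a block: at most sublist_size and at most the list length
lemma pvBlockLen (el : List Int) (i ss : Int) (h0 : 0 ≤ i) (hss : 0 < ss) :
    ((PySem.List.slice el (some i) (some (i + ss))).length : Int)
      ≤ min ss (el.length : Int) := by
  rw [PySem.List.length_slice]
  simp only [PySem.List.clampIdx]
  split_ifs <;> push_cast <;> omega

-- an append-step fold never empties a nonempty accumulator
lemma pvFoldNe (f : List Int → Int → List Int)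
    (hf : ∀ (acc : List Int) (i : Int), acc ≠ [] → f acc i ≠ []) (l : List Int) :
    ∀ (acc : List Int), acc ≠ [] → l.foldl f acc ≠ [] := by
  induction l with
  | nil => intro acc h; exact h
  | cons x xs ih =>
      intro acc h
      simp only [List.foldl_cons]
      exact ih _ (hf acc x h)

-- a fold whose step returns the accumulator unchanged is the identity
lemma pvFoldId (l : List Int) : ∀ (acc : List Int), l.foldl (fun a _ => a) acc = acc := by
  induction l with
  | nil => intro acc; rfl
  | cons x xs ih => intro acc; simpa using ih acc

-- a positive-step range starting at 0 over a positive length begins with 0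
lemma pvRange_cons (n ss : Int) (hn : 0 < n) (hss : 0 < ss) :
    ∃ rest, PySem.List.pyRange 0 n ss = 0 :: rest := by
  rw [PySem.List.pyRange_of_pos 0 n hss, if_pos (by omega)]
  have h1 : 1 ≤ (n - 0 + ss - 1) / ss := by
    rw [Int.le_ediv_iff_mul_le hss]; omega
  obtain ⟨c, hc⟩ : ∃ c, ((n - 0 + ss - 1) / ss).toNat = c + 1 :=
    ⟨((n - 0 + ss - 1) / ss).toNat - 1, by omega⟩
  rw [hc, List.range_succ_eq_map, List.map_cons]
  rw [show (0 : Int) + ss * ((0 : Nat) : Int) = 0 from by norm_num]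
  exact ⟨_, rfl⟩

-- ===== VERDICT (by name: the statement is the Claim_ definition above) =====
theorem extract_max_indices_spec : Claim_unchanged_extract_max_indices := by
  intro el ss me _hdom hpre hnd
  unfold Pre_extract_max_indices at hpre
  unfold D_extract_max_indices at hnd
  show extract_max_indices el ss me = extract_max_indices_alt el ss me
  unfold extract_max_indices extract_max_indices_alt
  rcases lt_trichotomy ss 0 with hss | hss | hss
  · rw [show PySem.List.pyRange 0 (el.length : Int) ss = [] from by
          rw [PySem.List.pyRange_of_neg 0 (el.length : Int) hss,
              if_neg (by omega)]
          rfl]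
    rfl
  · exact absurd hss hpre
  · apply PySem.List.foldl_congr_mem
    intro acc i hi
    have hi0 : 0 ≤ i := by
      have := ((PySem.List.mem_pyRange_iff_of_pos hss i).1 hi).1
      omega
    apply pvBlock
    intro hme
    have hb := pvBlockLen el i ss hi0 hss
    omega

theorem extract_max_indices_changed : Claim_changed_extract_max_indices := by
  unfold Claim_changed_extract_max_indices; decide

theorem extract_max_indices_tight : Claim_exact_extract_max_indices := by
  intro el ss me _hdom _hpre hd
  obtain ⟨hme, hss, hmin⟩ := hd
  -- B is []: every per-block selection count min(me, len).toNat is 0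
  have hB : extract_max_indices_alt el ss me = [] := by
    unfold extract_max_indices_alt
    refine (PySem.List.foldl_congr_mem _ _ (fun (a : List Int) (_ : Int) => a) [] ?_).trans
      (pvFoldId _ [])
    intro acc i _
    show pvSelect _ i ((min me ((PySem.List.slice el (some i) (some (i + ss))).length : Int)).toNat)
      PySem.Set.empty acc = acc
    rw [show (min me ((PySem.List.slice el (some i) (some (i + ss))).length : Int)).toNat = 0
          from by omega]
    rfl
  rw [hB]
  -- A is nonempty: the first block (at i = 0) already contributes at least one index
  unfold extract_max_indices
  obtain ⟨rest, hcons⟩ := pvRange_cons (el.length : Int) ss (by omega) hss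
  rw [hcons, List.foldl_cons]
  apply pvFoldNe
  · -- the step preserves nonemptiness
    intro acc i hacc
    show (PySem.List.slice _ none (some me)).foldl (fun a idx => a ++ [i + idx]) acc ≠ []
    rw [PySem.List.foldl_append_singleton_eq_map]
    simp [hacc]
  · -- the first block contributes a nonempty list
    show (PySem.List.slice
        (pvL (PySem.List.slice el (some 0) (some (0 + ss)))) none (some me)).foldl
        (fun a idx => a ++ [(0 : Int) + idx]) [] ≠ []
    rw [PySem.List.foldl_append_singleton_eq_map]
    set block0 := PySem.List.slice el (some 0) (some (0 + ss)) with hb0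
    have hlen0 : (block0.length : Int) = min ss (el.length : Int) := by
      rw [hb0, PySem.List.length_slice]
      simp only [PySem.List.clampIdx]
      split_ifs <;> push_cast <;> omega
    have hpos : 0 < (block0.length : Int) + me := by omega
    have hslice : PySem.List.slice (pvL block0) none (some me)
        = List.take (((block0.length : Int) + me).toNat) (pvL block0) := by
      have hs : PySem.List.slice (pvL block0) none (some me)
          = List.take (PySem.List.clampIdx (pvL block0).length me) (pvL block0) := by
        simp [PySem.List.slice]
      rw [hs, pvL_length]
      congr 1
      simp only [PySem.List.clampIdx, hme, if_true]
      split_ifs <;> omega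
    rw [hslice]
    apply List.ne_nil_of_length_pos
    simp only [List.nil_append, List.length_map, List.length_take, pvL_length]
    omega
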